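-- pv_equiv track=rewrite | github.com/jamilr/coderbyte_training | even_pairs.py | even_pairs
-- ===== SOURCE A (Python) =====
-- def even_pairs(s: str) -> bool:
--     if not s:
--         return False
--     n = len(s)
--     even_count = 0
--     for i in range(n):
--         if not ('0' <= s[i] <= '9'):
--             even_count = 0
--             continue
--         if (ord(s[i]) - ord('0')) % 2 == 0:
--             even_count += 1
--         if even_count == 2:
--             return True
--     return False
-- ===== SOURCE B (Python) =====
-- def even_pairs(s: str) -> bool:
--     # Partition s into maximal runs of ASCII digits, then answer whether some
--     # run contains at least two even digits.
--     runs = []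
--     i, n = 0, len(s)
--     while i < n:
--         if '0' <= s[i] <= '9':
--             j = i
--             while j < n and '0' <= s[j] <= '9':
--                 j += 1
--             runs.append(s[i:j])
--             i = j
--         else:
--             i += 1
--     return any(sum(1 for c in run if int(c) % 2 == 0) >= 2 for run in runs)
-- ===== Notes on version B (the rewrite author's own statement) =====
-- stated objective: alternative
-- what changed: Replaced A's single stateful scan (even-counter reset on non-digits) with a groupby partition of the string into maximal digit runs, returning True iff some run contains at least two even digits.
import Mathlib
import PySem

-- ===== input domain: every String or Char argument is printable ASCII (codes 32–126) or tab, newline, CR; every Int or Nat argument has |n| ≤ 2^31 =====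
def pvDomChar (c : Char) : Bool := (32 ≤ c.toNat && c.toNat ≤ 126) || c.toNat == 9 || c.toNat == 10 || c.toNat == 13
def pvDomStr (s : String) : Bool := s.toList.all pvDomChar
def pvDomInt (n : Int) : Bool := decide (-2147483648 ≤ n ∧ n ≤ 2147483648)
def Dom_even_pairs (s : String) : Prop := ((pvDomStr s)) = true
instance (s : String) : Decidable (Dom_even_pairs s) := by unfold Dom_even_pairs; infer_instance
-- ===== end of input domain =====

-- B replaces A's stateful streaming scan with a partition into maximal digit runs,
-- returning true iff some run holds at least two even digits (objective: alternative).


-- ===== PORT A =====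
-- A's loop: counter of even digits, reset to 0 on any non-digit, early return at 2.
def evenPairsLoopA : List Char → Nat → Bool
  | [], _ => false
  | c :: rest, even_count =>
    if ¬('0' ≤ c ∧ c ≤ '9') then evenPairsLoopA rest 0
    else
      let even_count' := if (((c.toNat : Int) - 48) % 2 == 0) then even_count + 1 else even_count
      if even_count' == 2 then true else evenPairsLoopA rest even_count'

def even_pairs (s : String) : Bool :=
  if s.toList = [] then false
  else evenPairsLoopA s.toList 0

-- ===== PORT B =====
def isAsciiDigitB (c : Char) : Bool := decide ('0' ≤ c ∧ c ≤ '9')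

def isEvenDigitB (c : Char) : Bool := ((c.toNat : Int) - 48) % 2 == 0

-- maximal runs of ASCII digits (the digit groups of Python's groupby)
def digitRuns : List Char → List (List Char)
  | [] => []
  | c :: rest =>
    if isAsciiDigitB c then
      ((c :: rest).takeWhile isAsciiDigitB) :: digitRuns ((c :: rest).dropWhile isAsciiDigitB)
    else
      digitRuns rest
  termination_by l => l.length
  decreasing_by
    · simp only [List.dropWhile_cons, *]
      exact Nat.lt_succ_of_le (List.length_dropWhile_le _ _)
    · exact Nat.lt_succ_self rest.length

def even_pairs_alt (s : String) : Bool :=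
  (digitRuns s.toList).any (fun run => 2 ≤ run.countP isEvenDigitB)

-- ===== PRECONDITION & SPEC =====
def Spec_even_pairs (s : String) (out : Bool) : Prop := out = even_pairs_alt s
instance (s : String) (out : Bool) : Decidable (Spec_even_pairs s out) := by unfold Spec_even_pairs; infer_instance

-- ===== CLAIM (what is proved, stated in full; the proofs are below) =====
def Claim_equal_even_pairs : Prop := ∀ (s : String), Dom_even_pairs s → Spec_even_pairs s (even_pairs s)

-- ===== LEMMAS AND PROOFS =====

def runsAny (l : List Char) : Bool :=
  (digitRuns l).any (fun run => 2 ≤ run.countP isEvenDigitB)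

lemma runs_unfold (l : List Char) :
    runsAny l =
      (decide (2 ≤ (l.takeWhile isAsciiDigitB).countP isEvenDigitB)
        || runsAny (l.dropWhile isAsciiDigitB)) := by
  cases l with
  | nil => simp [runsAny, digitRuns]
  | cons c rest =>
    by_cases hd : isAsciiDigitB c
    · rw [runsAny, digitRuns, if_pos hd]
      simp [runsAny]
    · simp [runsAny, digitRuns, hd]

lemma loopA_eq (l : List Char) : ∀ cnt : Nat, cnt < 2 →
    evenPairsLoopA l cnt =
      (decide (2 ≤ cnt + (l.takeWhile isAsciiDigitB).countP isEvenDigitB)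
        || runsAny (l.dropWhile isAsciiDigitB)) := by
  induction l with
  | nil =>
    intro cnt h
    simp only [evenPairsLoopA, List.takeWhile_nil, List.dropWhile_nil,
      List.countP_nil, runsAny, digitRuns, List.any_nil]
    simp
    omega
  | cons c rest ih =>
    intro cnt h
    by_cases hd : isAsciiDigitB c
    · have hd' : '0' ≤ c ∧ c ≤ '9' := by simpa [isAsciiDigitB] using hd
      rw [evenPairsLoopA, if_neg (by simpa using hd')]
      by_cases he : isEvenDigitB c
      · have heb : (((c.toNat : Int) - 48) % 2 == 0) = true := he
        by_cases h2 : cnt + 1 = 2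
        · have hgoal : 2 ≤ cnt + ((c :: rest).takeWhile isAsciiDigitB).countP isEvenDigitB := by
            rw [List.takeWhile_cons, if_pos hd, List.countP_cons, if_pos he]
            omega
          simp [heb, h2]
          exact Or.inl (by simpa using hgoal)
        · have hlt : cnt + 1 < 2 := by omega
          simp only [heb, if_true]
          rw [if_neg (by simpa using h2)]
          rw [ih (cnt + 1) hlt]
          rw [List.takeWhile_cons, if_pos hd, List.dropWhile_cons, if_pos hd,
            List.countP_cons, if_pos he]
          have harr : cnt + 1 + (rest.takeWhile isAsciiDigitB).countP isEvenDigitB =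
              cnt + ((rest.takeWhile isAsciiDigitB).countP isEvenDigitB + 1) := by omega
          rw [harr]
      · have heb : (((c.toNat : Int) - 48) % 2 == 0) = false := by
          simpa [isEvenDigitB] using he
        simp only [heb, Bool.false_eq_true, if_false]
        rw [if_neg (by simpa using (by omega : cnt ≠ 2))]
        rw [ih cnt h]
        simp [hd, he]
    · have hd' : ¬('0' ≤ c ∧ c ≤ '9') := by simpa [isAsciiDigitB] using hd
      rw [evenPairsLoopA, if_pos (by simpa using hd')]
      rw [ih 0 (by omega), Nat.zero_add]
      have h1 : List.takeWhile isAsciiDigitB (c :: rest) = [] := by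
        simp [hd]
      have h2 : List.dropWhile isAsciiDigitB (c :: rest) = c :: rest := by
        simp [hd]
      have h3 : runsAny (c :: rest) = runsAny rest := by
        rw [runsAny, digitRuns, if_neg (by simp [hd])]; rfl
      rw [h1, h2, h3, runs_unfold rest]
      have hc : decide (2 ≤ cnt + ([] : List Char).countP isEvenDigitB) = false := by
        simp
        omega
      rw [hc, Bool.false_or]

lemma runsAny_eq_alt (s : String) : even_pairs_alt s = runsAny s.toList := rfl

-- ===== VERDICT (by name: the statement is the Claim_ definition above) =====
theorem even_pairs_spec : Claim_equal_even_pairs := by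
  intro s _
  unfold Spec_even_pairs
  rw [runsAny_eq_alt, even_pairs]
  by_cases h : s.toList = []
  · rw [if_pos h, h]
    simp [runsAny, digitRuns]
  · rw [if_neg h, loopA_eq _ 0 (by omega), Nat.zero_add, runs_unfold s.toList]
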